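-- pv_equiv track=rewrite | github.com/y1ny/WordDeletion | scripts/process_ptb.py | get_spans_from_sentence
-- ===== SOURCE A (Python) =====
-- def get_spans_from_sentence(sentence, new_string):
--     sentence_words = sentence.lower().split()
--     new_words = new_string.lower().split()
--     assert set(new_words).issubset(sentence_words)
--     spans = []
--     i = 0
--     j = 0
--     while i < len(new_words) and j < len(sentence_words):
--         # If words match, begin a span
--         if new_words[i] == sentence_words[j]:
--             start = j
--             while i < len(new_words) and j < len(sentence_words) and new_words[i] == sentence_words[j]:
--                 i += 1
--                 j += 1
--             spans.append(" ".join(sentence_words[start:j]))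
--         else:
--             j += 1
--     assert " ".join(spans) == " ".join(new_words)
--     return spans
-- ===== SOURCE B (Python) =====
-- def get_spans_from_sentence(sentence, new_string):
--     sentence_words = sentence.lower().split()
--     new_words = new_string.lower().split()
--     assert set(new_words).issubset(sentence_words)
--     # First pass: greedy leftmost matched sentence index for each new word, in order.
--     idx = []
--     j = 0
--     for w in new_words:
--         while j < len(sentence_words) and sentence_words[j] != w:
--             j += 1
--         if j >= len(sentence_words):
--             break
--         idx.append(j)
--         j += 1
--     # Second pass: group words whose matched indices are consecutive into spans.
--     spans = []
--     group = []
--     prev = None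
--     for w, k in zip(new_words, idx):
--         if prev is not None and k == prev + 1:
--             group.append(w)
--         else:
--             if group:
--                 spans.append(" ".join(group))
--             group = [w]
--         prev = k
--     if group:
--         spans.append(" ".join(group))
--     assert " ".join(spans) == " ".join(new_words)
--     return spans
-- ===== Notes on version B (the rewrite author's own statement) =====
-- stated objective: alternative
-- what changed: A's single interleaved two-pointer loop (scan, consume a run, append the span, resume) is replaced by two separate passes: first a greedy index table recording the matched sentence position of each new word, then a grouping pass that joins words with consecutive indices into spans.
import Mathlib
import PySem

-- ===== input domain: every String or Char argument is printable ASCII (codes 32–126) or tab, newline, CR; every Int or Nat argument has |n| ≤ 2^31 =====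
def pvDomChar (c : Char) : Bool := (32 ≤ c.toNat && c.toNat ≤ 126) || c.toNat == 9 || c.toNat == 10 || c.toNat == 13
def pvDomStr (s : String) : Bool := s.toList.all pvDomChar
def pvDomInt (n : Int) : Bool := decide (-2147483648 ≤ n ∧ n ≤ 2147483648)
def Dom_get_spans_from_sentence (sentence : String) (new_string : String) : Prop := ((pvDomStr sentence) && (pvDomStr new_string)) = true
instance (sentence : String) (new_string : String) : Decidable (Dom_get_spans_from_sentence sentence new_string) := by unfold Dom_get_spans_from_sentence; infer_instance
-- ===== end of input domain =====

-- B replaces A's interleaved two-pointer scan-and-append loop by two separate passes: first a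
-- greedy index table (matched sentence position per new word), then a contiguity-grouping pass;
-- same return value wherever A returns (objective: alternative decomposition, same cost).
-- A's two asserts raise AssertionError on some inputs; those inputs are excluded by Pre_ below
-- (the ports have no exceptions, Python B raises in exactly the same cases).

-- ===== PORT A =====
-- A's inner while loop: consume the maximal matching run starting at (i, j)
def pvInnerA (sw nw : List String) (i j : Nat) : Nat × Nat :=
  if h : i < nw.length ∧ j < sw.length ∧ nw[i]! = sw[j]! then
    pvInnerA sw nw (i + 1) (j + 1)
  else (i, j)
termination_by sw.length - j
decreasing_by exact Nat.sub_succ_lt_self sw.length j h.2.1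

-- needed by pvLoopA's termination proof, so it stays above the port that cites it
theorem pvInnerA_snd_ge (sw nw : List String) (i j : Nat) : j ≤ (pvInnerA sw nw i j).2 := by
  fun_induction pvInnerA with
  | case1 i j h ih => omega
  | case2 i j h => simp

theorem pvInnerA_snd_gt (sw nw : List String) (i j : Nat)
    (h : i < nw.length ∧ j < sw.length ∧ nw[i]! = sw[j]!) : j < (pvInnerA sw nw i j).2 := by
  rw [pvInnerA, dif_pos h]
  have := pvInnerA_snd_ge sw nw (i + 1) (j + 1)
  omega

-- A's outer while loop; sentence_words[start:j] with 0 ≤ start ≤ j ≤ len is exactly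
-- (sw.drop start).take (j - start)
def pvLoopA (sw nw : List String) (i j : Nat) (spans : List String) : List String :=
  if h1 : i < nw.length ∧ j < sw.length then
    if h2 : nw[i]! = sw[j]! then
      pvLoopA sw nw (pvInnerA sw nw i j).1 (pvInnerA sw nw i j).2
        (spans ++ [PySem.Str.join " " ((sw.drop j).take ((pvInnerA sw nw i j).2 - j))])
    else pvLoopA sw nw i (j + 1) spans
  else spans
termination_by sw.length - j
decreasing_by
  · exact Nat.sub_lt_sub_left h1.2 (pvInnerA_snd_gt sw nw i j ⟨h1.1, h1.2, h2⟩)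
  · exact Nat.sub_succ_lt_self sw.length j h1.2

-- the two asserts raise on inputs excluded by Pre_; on Pre_ they are no-ops
def get_spans_from_sentence (sentence : String) (new_string : String) : List String :=
  pvLoopA (PySem.Str.split₀ (PySem.Str.lower sentence))
    (PySem.Str.split₀ (PySem.Str.lower new_string)) 0 0 []

-- ===== PORT B =====
-- first pass helper: advance j while it mismatches w (B's inner while), none = exhausted
def pvFindFrom (sw : List String) (w : String) (j : Nat) : Option Nat :=
  if h : j < sw.length then
    if sw[j]! = w then some j else pvFindFrom sw w (j + 1)
  else none
termination_by sw.length - j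
decreasing_by exact Nat.sub_succ_lt_self sw.length j h

-- first pass: matched sentence index for each new word in order (stops early if exhausted)
def pvBuildIdx (sw : List String) (nw : List String) (j : Nat) : List Nat :=
  match nw with
  | [] => []
  | w :: rest =>
    match pvFindFrom sw w j with
    | none => []
    | some k => k :: pvBuildIdx sw rest (k + 1)

-- `if group: spans.append(" ".join(group))`
def pvFlush (spans group : List String) : List String :=
  if group = [] then spans else spans ++ [PySem.Str.join " " group]

-- second pass: group words whose matched indices are consecutive
def pvGroupLoop : List (String × Nat) → List String → List String → Option Nat → List String × List String
  | [], spans, group, _ => (spans, group)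
  | (w, k) :: rest, spans, group, prev =>
    match prev with
    | some p =>
      if k = p + 1 then pvGroupLoop rest spans (group ++ [w]) (some k)
      else pvGroupLoop rest (pvFlush spans group) [w] (some k)
    | none => pvGroupLoop rest (pvFlush spans group) [w] (some k)

def get_spans_from_sentence_alt (sentence : String) (new_string : String) : List String :=
  let sw := PySem.Str.split₀ (PySem.Str.lower sentence)
  let nw := PySem.Str.split₀ (PySem.Str.lower new_string)
  let idx := pvBuildIdx sw nw 0
  let q := pvGroupLoop (nw.zip idx) [] [] none
  pvFlush q.1 q.2

-- ===== PRECONDITION & SPEC =====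
-- Pre_ excludes exactly the inputs where Python A raises AssertionError: A returns normally
-- iff the lowercased new words form a subsequence of the lowercased sentence words
-- (then both asserts pass; otherwise one of them fails).
def Pre_get_spans_from_sentence (sentence : String) (new_string : String) : Prop :=
  List.Sublist (PySem.Str.split₀ (PySem.Str.lower new_string))
    (PySem.Str.split₀ (PySem.Str.lower sentence))
instance (sentence : String) (new_string : String) : Decidable (Pre_get_spans_from_sentence sentence new_string) := by
  unfold Pre_get_spans_from_sentence; infer_instance

def pvWitness_get_spans_from_sentence : String × String := ("a b", "b")

def Spec_get_spans_from_sentence (sentence : String) (new_string : String) (out : List String) : Prop := out = get_spans_from_sentence_alt sentence new_string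
instance (sentence : String) (new_string : String) (out : List String) : Decidable (Spec_get_spans_from_sentence sentence new_string out) := by unfold Spec_get_spans_from_sentence; infer_instance

-- ===== CLAIM (what is proved, stated in full; the proofs are below) =====
def Claim_equal_get_spans_from_sentence : Prop := ∀ (sentence : String) (new_string : String), Dom_get_spans_from_sentence sentence new_string → Pre_get_spans_from_sentence sentence new_string → Spec_get_spans_from_sentence sentence new_string (get_spans_from_sentence sentence new_string)

-- ===== LEMMAS AND PROOFS =====

theorem pvFindFrom_some (sw : List String) (w : String) (j k : Nat)
    (h : pvFindFrom sw w j = some k) : j ≤ k ∧ k < sw.length ∧ sw[k]! = w := by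
  fun_induction pvFindFrom generalizing k with
  | case1 j hj hw => simp_all
  | case2 j hj hw ih =>
    obtain ⟨h1, h2, h3⟩ := ih k h
    exact ⟨by omega, h2, h3⟩
  | case3 j hj => simp_all

-- run structure of A's inner loop
theorem pvInnerA_spec (sw nw : List String) (i j : Nat) :
    ∃ r, pvInnerA sw nw i j = (i + r, j + r) ∧
      (nw.drop i).take r = (sw.drop j).take r ∧
      ¬(i + r < nw.length ∧ j + r < sw.length ∧ nw[i + r]! = sw[j + r]!) := by
  fun_induction pvInnerA with
  | case1 i j h ih =>
    obtain ⟨r, h1, h2, h3⟩ := ih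
    refine ⟨r + 1, ?_, ?_, ?_⟩
    · rw [h1]; simp [Prod.ext_iff]; omega
    · have hdn : nw.drop i = nw[i]! :: nw.drop (i + 1) := by
        rw [getElem!_pos nw i h.1]; exact (List.getElem_cons_drop h.1).symm
      have hds : sw.drop j = sw[j]! :: sw.drop (j + 1) := by
        rw [getElem!_pos sw j h.2.1]; exact (List.getElem_cons_drop h.2.1).symm
      rw [hdn, hds, List.take_succ_cons, List.take_succ_cons, h2, h.2.2]
    · have e1 : i + (r + 1) = i + 1 + r := by omega
      have e2 : j + (r + 1) = j + 1 + r := by omega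
      rw [e1, e2]; exact h3
  | case2 i j h =>
    exact ⟨0, by simp, by simp, by simpa using h⟩

-- characterisation of A's outer loop step at word i in terms of pvFindFrom
theorem pvLoopA_eq (sw nw : List String) (i : Nat) (hi : i < nw.length) :
    ∀ (n j : Nat), sw.length ≤ j + n → ∀ spans,
    pvLoopA sw nw i j spans =
      match pvFindFrom sw (nw[i]!) j with
      | none => spans
      | some k => pvLoopA sw nw (pvInnerA sw nw i k).1 (pvInnerA sw nw i k).2
          (spans ++ [PySem.Str.join " " ((sw.drop k).take ((pvInnerA sw nw i k).2 - k))]) := by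
  intro n
  induction n with
  | zero =>
    intro j hle spans
    have hj : ¬ j < sw.length := by omega
    rw [pvLoopA, pvFindFrom, dif_neg (show ¬(i < nw.length ∧ j < sw.length) by omega), dif_neg hj]
  | succ m ih =>
    intro j hle spans
    by_cases hj : j < sw.length
    · by_cases hw : nw[i]! = sw[j]!
      · rw [pvLoopA, pvFindFrom, dif_pos (show i < nw.length ∧ j < sw.length from ⟨hi, hj⟩),
          dif_pos hw, dif_pos hj, if_pos hw.symm]
      · have hw' : ¬ sw[j]! = nw[i]! := fun e => hw e.symm
        rw [pvLoopA, pvFindFrom, dif_pos (show i < nw.length ∧ j < sw.length from ⟨hi, hj⟩),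
          dif_neg hw, dif_pos hj, if_neg hw']
        exact ih (j + 1) (by omega) spans
    · rw [pvLoopA, pvFindFrom, dif_neg (show ¬(i < nw.length ∧ j < sw.length) by omega), dif_neg hj]

-- B's second pass walks straight through a matching run, extending the group
theorem pvRun (sw nw : List String) : ∀ (n i k : Nat) (S g : List String),
    nw.length ≤ i + n → g ≠ [] →
    pvGroupLoop ((nw.drop i).zip (pvBuildIdx sw (nw.drop i) (k + 1))) S g (some k) =
    pvGroupLoop ((nw.drop ((pvInnerA sw nw i (k + 1)).1)).zip
        (pvBuildIdx sw (nw.drop ((pvInnerA sw nw i (k + 1)).1)) ((pvInnerA sw nw i (k + 1)).2)))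
      S (g ++ (nw.drop i).take ((pvInnerA sw nw i (k + 1)).1 - i))
      (some ((pvInnerA sw nw i (k + 1)).2 - 1)) := by
  intro n
  induction n with
  | zero =>
    intro i k S g hle hg
    have hni : ¬(i < nw.length ∧ k + 1 < sw.length ∧ nw[i]! = sw[k + 1]!) := fun h => by omega
    have hIA : pvInnerA sw nw i (k + 1) = (i, k + 1) := by rw [pvInnerA, dif_neg hni]
    rw [hIA]
    simp
  | succ m ih =>
    intro i k S g hle hg
    by_cases hC : i < nw.length ∧ k + 1 < sw.length ∧ nw[i]! = sw[k + 1]!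
    · obtain ⟨hi, hk, hw⟩ := hC
      have hd : nw.drop i = nw[i]! :: nw.drop (i + 1) := by
        rw [getElem!_pos nw i hi]; exact (List.getElem_cons_drop hi).symm
      have hf : pvFindFrom sw (nw[i]!) (k + 1) = some (k + 1) := by
        rw [pvFindFrom, dif_pos hk, if_pos hw.symm]
      have hIA : pvInnerA sw nw i (k + 1) = pvInnerA sw nw (i + 1) (k + 1 + 1) := by
        rw [pvInnerA, dif_pos ⟨hi, hk, hw⟩]
      rw [hIA, hd]
      rw [show pvBuildIdx sw (nw[i]! :: nw.drop (i + 1)) (k + 1)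
            = (k + 1) :: pvBuildIdx sw (nw.drop (i + 1)) (k + 1 + 1) from by rw [pvBuildIdx, hf]]
      rw [List.zip_cons_cons]
      rw [show pvGroupLoop ((nw[i]!, k + 1) :: (nw.drop (i + 1)).zip (pvBuildIdx sw (nw.drop (i + 1)) (k + 1 + 1))) S g (some k)
            = pvGroupLoop ((nw.drop (i + 1)).zip (pvBuildIdx sw (nw.drop (i + 1)) (k + 1 + 1))) S (g ++ [nw[i]!]) (some (k + 1)) from by
          simp [pvGroupLoop]]
      rw [ih (i + 1) (k + 1) S (g ++ [nw[i]!]) (by omega) (by simp)]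
      obtain ⟨r, hr, _, _⟩ := pvInnerA_spec sw nw (i + 1) (k + 1 + 1)
      rw [hr]
      rw [show i + 1 + r - (i + 1) = r from by omega, show i + 1 + r - i = r + 1 from by omega,
        List.take_succ_cons, List.append_assoc, List.singleton_append]
    · have hIA : pvInnerA sw nw i (k + 1) = (i, k + 1) := by rw [pvInnerA, dif_neg hC]
      rw [hIA]
      simp

-- the main invariant tying A's interleaved loop to B's two passes
theorem pvMain (sw nw : List String) : ∀ (n i j : Nat) (S g : List String) (p : Option Nat),
    nw.length ≤ i + n →
    (∀ pp, p = some pp → j = pp + 1 ∧ g ≠ [] ∧ ¬(i < nw.length ∧ j < sw.length ∧ nw[i]! = sw[j]!)) →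
    pvLoopA sw nw i j (pvFlush S g) =
      pvFlush (pvGroupLoop ((nw.drop i).zip (pvBuildIdx sw (nw.drop i) j)) S g p).1
              (pvGroupLoop ((nw.drop i).zip (pvBuildIdx sw (nw.drop i) j)) S g p).2 := by
  intro n
  induction n with
  | zero =>
    intro i j S g p hle Hp
    have hni : ¬(i < nw.length ∧ j < sw.length) := fun h => by omega
    rw [pvLoopA, dif_neg hni, List.drop_eq_nil_of_le (by omega)]
    simp [pvBuildIdx, pvGroupLoop]
  | succ m ih =>
    intro i j S g p hle Hp
    by_cases hi : i < nw.length
    · rw [pvLoopA_eq sw nw i hi sw.length j (by omega)]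
      have hd : nw.drop i = nw[i]! :: nw.drop (i + 1) := by
        rw [getElem!_pos nw i hi]; exact (List.getElem_cons_drop hi).symm
      rw [hd]
      cases hf : pvFindFrom sw (nw[i]!) j with
      | none =>
        rw [show pvBuildIdx sw (nw[i]! :: nw.drop (i + 1)) j = [] from by rw [pvBuildIdx, hf]]
        simp [pvGroupLoop]
      | some k =>
        obtain ⟨hjk, hk, hwk⟩ := pvFindFrom_some sw (nw[i]!) j k hf
        rw [show pvBuildIdx sw (nw[i]! :: nw.drop (i + 1)) j
              = k :: pvBuildIdx sw (nw.drop (i + 1)) (k + 1) from by rw [pvBuildIdx, hf]]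
        rw [List.zip_cons_cons]
        have hstep : pvGroupLoop ((nw[i]!, k) :: (nw.drop (i + 1)).zip (pvBuildIdx sw (nw.drop (i + 1)) (k + 1))) S g p
            = pvGroupLoop ((nw.drop (i + 1)).zip (pvBuildIdx sw (nw.drop (i + 1)) (k + 1))) (pvFlush S g) [nw[i]!] (some k) := by
          cases p with
          | none => simp [pvGroupLoop]
          | some pp =>
            obtain ⟨hjp, hgne, hmm⟩ := Hp pp rfl
            have hne : ¬ k = pp + 1 := by
              intro e
              have hjk2 : j = k := by omega
              exact hmm ⟨hi, hjk2 ▸ hk, by rw [hjk2]; exact hwk.symm⟩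
            simp [pvGroupLoop, hne]
        rw [hstep]
        rw [pvRun sw nw m (i + 1) k (pvFlush S g) [nw[i]!] (by omega) (by simp)]
        obtain ⟨r, hr, htake, hstop⟩ := pvInnerA_spec sw nw (i + 1) (k + 1)
        have hIA : pvInnerA sw nw i k = (i + 1 + r, k + 1 + r) := by
          rw [pvInnerA, dif_pos ⟨hi, hk, hwk.symm⟩, hr]
        show pvLoopA sw nw (pvInnerA sw nw i k).1 (pvInnerA sw nw i k).2
            (pvFlush S g ++ [PySem.Str.join " " ((sw.drop k).take ((pvInnerA sw nw i k).2 - k))]) = _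
        rw [hIA, hr]
        rw [show i + 1 + r - (i + 1) = r from by omega, show k + 1 + r - 1 = k + r from by omega,
          List.singleton_append]
        have hmain := ih (i + 1 + r) (k + 1 + r) (pvFlush S g)
            (nw[i]! :: (nw.drop (i + 1)).take r) (some (k + r)) (by omega)
            (by
              intro pp hpp
              injection hpp with e
              exact ⟨by omega, by simp, hstop⟩)
        rw [← hmain]
        congr 1
        have hds : sw.drop k = sw[k]! :: sw.drop (k + 1) := by
          rw [getElem!_pos sw k hk]; exact (List.getElem_cons_drop hk).symm
        rw [show k + 1 + r - k = r + 1 from by omega, hds, List.take_succ_cons, hwk, htake]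
        simp [pvFlush]
    · rw [pvLoopA, dif_neg (fun h => hi h.1), List.drop_eq_nil_of_le (by omega)]
      simp [pvBuildIdx, pvGroupLoop]

-- ===== VERDICT (by name: the statement is the Claim_ definition above) =====
theorem get_spans_from_sentence_spec : Claim_equal_get_spans_from_sentence := by
  intro s n _ _
  unfold Spec_get_spans_from_sentence get_spans_from_sentence get_spans_from_sentence_alt
  have := pvMain (PySem.Str.split₀ (PySem.Str.lower s)) (PySem.Str.split₀ (PySem.Str.lower n))
    (PySem.Str.split₀ (PySem.Str.lower n)).length 0 0 [] [] none (by omega) (by simp)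
  simpa [pvFlush] using this
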